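-- pv_equiv track=rewrite | github.com/raiyin/codewars | python/main.py | sort_the_odd
-- ===== SOURCE A (Python) =====
-- def sort_the_odd(source_array):
--     sorted_odd_array = [item for item in source_array if item % 2 == 1]
--     sorted_odd_array.sort()
--     odd_index = 0
--     for index in range(len(source_array)):
--         if source_array[index] % 2 == 1:
--             source_array[index] = sorted_odd_array[odd_index]
--             odd_index += 1
--     return source_array
-- ===== SOURCE B (Python) =====
-- def sort_the_odd(source_array):
--     odd_positions = []
--     for i in range(len(source_array)):
--         v = source_array[i]
--         if v % 2 == 1:
--             odd_positions.append(i)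
--             j = len(odd_positions) - 1
--             while j > 0 and source_array[odd_positions[j - 1]] > v:
--                 source_array[odd_positions[j]] = source_array[odd_positions[j - 1]]
--                 j -= 1
--             source_array[odd_positions[j]] = v
--     return source_array
-- ===== Notes on version B (the rewrite author's own statement) =====
-- stated objective: alternative
-- what changed: B never collects and sorts the odd values and has no write-back pass: it runs an in-place insertion sort over the odd slots themselves, shifting previously placed odd values rightward along the recorded odd positions until the new value's slot is found, so the array is sorted incrementally as it is scanned.
import Mathlib
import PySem

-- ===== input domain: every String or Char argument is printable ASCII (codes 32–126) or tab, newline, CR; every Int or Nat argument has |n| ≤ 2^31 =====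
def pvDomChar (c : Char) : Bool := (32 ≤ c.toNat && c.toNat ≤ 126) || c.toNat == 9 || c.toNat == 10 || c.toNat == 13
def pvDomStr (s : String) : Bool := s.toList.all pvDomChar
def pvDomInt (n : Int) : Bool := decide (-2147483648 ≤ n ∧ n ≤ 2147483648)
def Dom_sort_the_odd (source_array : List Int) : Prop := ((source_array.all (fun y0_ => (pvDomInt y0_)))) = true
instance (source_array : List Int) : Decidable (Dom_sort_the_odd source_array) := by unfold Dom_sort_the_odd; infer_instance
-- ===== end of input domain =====

-- B replaces A's collect-sort-write-back with an in-place insertion sort over the odd slots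
-- (objective: alternative). Both Pythons mutate source_array in place to the same final state;
-- the equivalence proved here is about the return value.

-- ===== PORT A =====
def sort_the_odd (source_array : List Int) : List Int :=
  let sorted_odd_array :=
    PySem.List.sorted (source_array.filter (fun item => PySem.Int.mod item 2 == 1)) (fun x => x) false
  ((PySem.List.pyRange 0 (PySem.List.len source_array) 1).foldl
    (fun (st : List Int × Int) index =>
      if PySem.Int.mod (PySem.List.pyGetD st.1 index 0) 2 == 1 then
        (PySem.List.pySetD st.1 index (PySem.List.pyGetD sorted_odd_array st.2 0), st.2 + 1)
      else st)
    (source_array, 0)).1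

-- ===== PORT B =====
-- the inner `while j > 0 and source_array[odd_positions[j-1]] > v` shifting loop of Source B
def bShift (pos : List Int) (v : Int) : Nat → List Int → List Int × Nat
  | 0, arr => (arr, 0)
  | j + 1, arr =>
    if PySem.List.pyGetD arr (PySem.List.pyGetD pos ((j : Nat) : Int) 0) 0 > v then
      bShift pos v j
        (PySem.List.pySetD arr (PySem.List.pyGetD pos (((j + 1 : Nat)) : Int) 0)
          (PySem.List.pyGetD arr (PySem.List.pyGetD pos ((j : Nat) : Int) 0) 0))
    else (arr, j + 1)

def sort_the_odd_alt (source_array : List Int) : List Int :=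
  ((PySem.List.pyRange 0 (PySem.List.len source_array) 1).foldl
    (fun (st : List Int × List Int) i =>
      let v := PySem.List.pyGetD st.1 i 0
      if PySem.Int.mod v 2 == 1 then
        let pos := st.2 ++ [i]
        let r := bShift pos v (pos.length - 1) st.1
        (PySem.List.pySetD r.1 (PySem.List.pyGetD pos ((r.2 : Nat) : Int) 0) v, pos)
      else st)
    (source_array, [])).1

-- ===== PRECONDITION & SPEC =====
def Spec_sort_the_odd (source_array : List Int) (out : List Int) : Prop := out = sort_the_odd_alt source_array
instance (source_array : List Int) (out : List Int) : Decidable (Spec_sort_the_odd source_array out) := by unfold Spec_sort_the_odd; infer_instance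

-- ===== CLAIM (what is proved, stated in full; the proofs are below) =====
def Claim_equal_sort_the_odd : Prop := ∀ (source_array : List Int), Dom_sort_the_odd source_array → Spec_sort_the_odd source_array (sort_the_odd source_array)

-- ===== LEMMAS AND PROOFS =====

-- Common functional model: replace each odd slot of xs by the next element of vs.
def fillOdds : List Int → List Int → List Int
  | [], _ => []
  | x :: r, vs =>
    if PySem.Int.mod x 2 == 1 then vs.headD 0 :: fillOdds r vs.tail
    else x :: fillOdds r vs

-- positions (from offset s) of the odd entries
def oddIdx : List Int → Nat → List Nat
  | [], _ => []
  | x :: r, s => if PySem.Int.mod x 2 == 1 then s :: oddIdx r (s + 1) else oddIdx r (s + 1)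

-- pure model of Source B's shifting loop: insert v into s searching backwards from index j
def rins (v : Int) (s : List Int) : Nat → List Int
  | 0 => v :: s
  | j + 1 => if s.getD j 0 > v then rins v s j else s.take (j + 1) ++ v :: s.drop (j + 1)

def insStep (s : List Int) (v : Int) : List Int := rins v s s.length

theorem length_fillOdds (xs vs : List Int) : (fillOdds xs vs).length = xs.length := by
  induction xs generalizing vs with
  | nil => simp [fillOdds]
  | cons x r ih => simp only [fillOdds]; split_ifs <;> simp [ih]

theorem fillOdds_append (p q t : List Int) :
    fillOdds (p ++ q) t
      = fillOdds p t ++ fillOdds q (t.drop (p.countP (fun x => PySem.Int.mod x 2 == 1))) := by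
  induction p generalizing t with
  | nil => simp [fillOdds]
  | cons x r ih =>
    simp only [List.cons_append, fillOdds, List.countP_cons]
    split_ifs with hx
    · simp [ih]
    · simp [ih]

theorem fillOdds_take (p t e : List Int)
    (h : p.countP (fun x => PySem.Int.mod x 2 == 1) ≤ t.length) :
    fillOdds p (t ++ e) = fillOdds p t := by
  induction p generalizing t with
  | nil => simp [fillOdds]
  | cons x r ih =>
    simp only [fillOdds, List.countP_cons] at *
    split_ifs with hx
    · simp only [hx, if_pos] at h
      cases t with
      | nil => simp at h
      | cons a t' =>
        simp only [List.cons_append, List.headD_cons, List.tail_cons]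
        rw [ih t' (by simpa using Nat.le_of_succ_le_succ (by simpa using h))]
    · simp only [hx, Bool.false_eq_true, if_false] at h ⊢
      rw [ih t (by simpa using h)]

theorem oddIdx_shift (r : List Int) (s : Nat) :
    oddIdx r (s + 1) = (oddIdx r s).map (· + 1) := by
  induction r generalizing s with
  | nil => simp [oddIdx]
  | cons x q ih => simp only [oddIdx]; split_ifs <;> simp [ih]

theorem length_oddIdx (p : List Int) (s : Nat) :
    (oddIdx p s).length = p.countP (fun x => PySem.Int.mod x 2 == 1) := by
  induction p generalizing s with
  | nil => simp [oddIdx]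
  | cons x r ih => simp only [oddIdx, List.countP_cons]; split_ifs <;> simp [ih]

theorem oddIdx_append (p q : List Int) (s : Nat) :
    oddIdx (p ++ q) s = oddIdx p s ++ oddIdx q (s + p.length) := by
  induction p generalizing s with
  | nil => simp [oddIdx]
  | cons x r ih =>
    simp only [List.cons_append, oddIdx, List.length_cons]
    split_ifs <;> simp [ih, Nat.add_assoc, Nat.add_comm 1]

theorem oddIdx_bound (p : List Int) : ∀ (s : Nat), ∀ q ∈ oddIdx p s, q < s + p.length := by
  induction p with
  | nil => intro s q hq; simp [oddIdx] at hq
  | cons x r ih =>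
    intro s q hq
    simp only [oddIdx] at hq
    split_ifs at hq with hx
    · rcases List.mem_cons.1 hq with h | h
      · simp [h]
      · have := ih (s + 1) q h; simp only [List.length_cons]; omega
    · have := ih (s + 1) q hq; simp only [List.length_cons]; omega

theorem getD_map_succ : ∀ (L : List Nat) (k : Nat), k < L.length →
    (L.map (· + 1)).getD k 0 = L.getD k 0 + 1 := by
  intro L
  induction L with
  | nil => intro k hk; simp at hk
  | cons a r ih => intro k hk; cases k with
    | zero => simp
    | succ k' => simpa using ih k' (by simpa using Nat.lt_of_succ_lt_succ hk)

theorem oddIdx_lt (p : List Int) (k : Nat)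
    (hk : k < p.countP (fun x => PySem.Int.mod x 2 == 1)) :
    (oddIdx p 0).getD k 0 < p.length := by
  have hlen : k < (oddIdx p 0).length := by rw [length_oddIdx]; exact hk
  have hmem : (oddIdx p 0).getD k 0 ∈ oddIdx p 0 := by
    rw [List.getD_eq_getElem?_getD, List.getElem?_eq_getElem hlen]
    exact List.getElem_mem hlen
  simpa using oddIdx_bound p 0 _ hmem

theorem fill_get (p t : List Int) (k : Nat)
    (ht : t.length = p.countP (fun x => PySem.Int.mod x 2 == 1))
    (hk : k < p.countP (fun x => PySem.Int.mod x 2 == 1)) :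
    (fillOdds p t).getD ((oddIdx p 0).getD k 0) 0 = t.getD k 0 := by
  induction p generalizing t k with
  | nil => simp at hk
  | cons x r ih =>
    simp only [fillOdds, oddIdx, List.countP_cons] at *
    split_ifs with hx
    · simp only [hx, if_pos] at ht hk
      rw [oddIdx_shift]
      cases t with
      | nil => simp at ht
      | cons a t' =>
        cases k with
        | zero => simp
        | succ k' =>
          have hk' : k' < r.countP (fun x => PySem.Int.mod x 2 == 1) := by omega
          have hlen : k' < (oddIdx r 0).length := by rw [length_oddIdx]; exact hk'
          simp only [List.getD_cons_succ, List.tail_cons]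
          rw [getD_map_succ _ _ hlen]
          simp only [List.getD_cons_succ]
          exact ih t' k' (by simpa using ht) hk'
    · simp only [hx, Bool.false_eq_true, if_false] at ht hk
      rw [oddIdx_shift]
      have hlen : k < (oddIdx r 0).length := by rw [length_oddIdx]; exact hk
      rw [getD_map_succ _ _ hlen]
      simp only [List.getD_cons_succ]
      exact ih t k ht hk

theorem fill_set (p t : List Int) (k : Nat) (w : Int)
    (ht : t.length = p.countP (fun x => PySem.Int.mod x 2 == 1))
    (hk : k < p.countP (fun x => PySem.Int.mod x 2 == 1)) :
    (fillOdds p t).set ((oddIdx p 0).getD k 0) w = fillOdds p (t.set k w) := by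
  induction p generalizing t k with
  | nil => simp at hk
  | cons x r ih =>
    simp only [fillOdds, oddIdx, List.countP_cons] at *
    split_ifs with hx
    · simp only [hx, if_pos] at ht hk
      rw [oddIdx_shift]
      cases t with
      | nil => simp at ht
      | cons a t' =>
        cases k with
        | zero => simp
        | succ k' =>
          have hk' : k' < r.countP (fun x => PySem.Int.mod x 2 == 1) := by omega
          have hlen : k' < (oddIdx r 0).length := by rw [length_oddIdx]; exact hk'
          simp only [List.getD_cons_succ, List.tail_cons]
          rw [getD_map_succ _ _ hlen]
          simp only [List.set_cons_succ, List.headD_cons, List.tail_cons]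
          rw [ih t' k' (by simpa using ht) hk']
    · simp only [hx, Bool.false_eq_true, if_false] at ht hk
      rw [oddIdx_shift]
      have hlen : k < (oddIdx r 0).length := by rw [length_oddIdx]; exact hk
      rw [getD_map_succ _ _ hlen]
      simp only [List.set_cons_succ]
      rw [ih t k ht hk]

theorem getD_map_cast (L : List Nat) (k : Nat) :
    (L.map (fun n : Nat => (n : Int))).getD k 0 = ((L.getD k 0 : Nat) : Int) := by
  induction L generalizing k with
  | nil => simp
  | cons a r ih =>
    cases k with
    | zero => simp
    | succ k' =>
      simp only [List.map_cons, List.getD_cons_succ]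
      exact ih k'

theorem length_rins (v : Int) (s : List Int) (j : Nat) (hj : j ≤ s.length) :
    (rins v s j).length = s.length + 1 := by
  induction j with
  | zero => simp [rins]
  | succ j ih =>
    simp only [rins]
    split_ifs
    · exact ih (by omega)
    · simp

theorem rins_perm (v : Int) (s : List Int) (j : Nat) (hj : j ≤ s.length) :
    (rins v s j).Perm (v :: s) := by
  induction j with
  | zero => simp [rins]
  | succ j ih =>
    simp only [rins]
    split_ifs
    · exact ih (by omega)
    · have h1 : (s.take (j+1) ++ v :: s.drop (j+1)).Perm (v :: (s.take (j+1) ++ s.drop (j+1))) :=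
        List.perm_middle
      simpa [List.take_append_drop] using h1

theorem rins_sorted (v : Int) (s : List Int) (j : Nat) (hj : j ≤ s.length)
    (hs : s.Pairwise (· ≤ ·)) (hv : ∀ x ∈ s.drop j, v < x) :
    (rins v s j).Pairwise (· ≤ ·) := by
  induction j with
  | zero =>
    simp only [rins]
    exact List.pairwise_cons.2 ⟨fun x hx => le_of_lt (hv x (by simpa using hx)), hs⟩
  | succ j ih =>
    have hjs : j < s.length := by omega
    simp only [rins]
    split_ifs with hg
    · apply ih (by omega)
      intro x hx
      rw [show s.drop j = s[j] :: s.drop (j+1) from (List.drop_eq_getElem_cons hjs).trans rfl] at hx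
      rcases List.mem_cons.1 hx with h | h
      · subst h; simpa [List.getD_eq_getElem?_getD, List.getElem?_eq_getElem, hjs] using hg
      · exact hv x h
    · have hle : s[j] ≤ v := by
        have := not_lt.1 (by simpa [List.getD_eq_getElem?_getD, List.getElem?_eq_getElem, hjs] using hg)
        exact this
      have hsplit : s = s.take (j+1) ++ s.drop (j+1) := (List.take_append_drop _ _).symm
      have hpw := hs
      rw [hsplit, List.pairwise_append] at hpw
      obtain ⟨h1, h2, h12⟩ := hpw
      rw [List.pairwise_append]
      refine ⟨h1, List.pairwise_cons.2 ⟨?_, h2⟩, ?_⟩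
      · intro x hx
        exact le_of_lt (hv x hx)
      · intro a ha b hb
        rcases List.mem_cons.1 hb with h | h
        · subst h
          -- a ∈ s.take (j+1): a = s[k] for k ≤ j, so a ≤ s[j] ≤ v
          obtain ⟨k, hk, hak⟩ := List.mem_iff_getElem.1 (by simpa using ha)
          have hkj : k ≤ j := by
            have := hk; simp [List.length_take] at this; omega
          have hklen : k < s.length := by omega
          have hax : a = s[k] := by
            rw [← hak]; simp [List.getElem_take]
          rcases Nat.lt_or_ge k j with hlt | hge
          · have : s[k] ≤ s[j] := by
              have := List.pairwise_iff_getElem.1 hs k j hklen hjs hlt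
              exact this
            rw [hax]; exact le_trans this hle
          · have : k = j := by omega
            subst this; rw [hax]; exact hle
        · exact h12 a ha b h

theorem insort_perm (l t : List Int) : (List.foldl insStep t l).Perm (t ++ l) := by
  induction l generalizing t with
  | nil => simp
  | cons v l ih =>
    simp only [List.foldl_cons]
    refine (ih (insStep t v)).trans ?_
    have h1 : (insStep t v ++ l).Perm ((v :: t) ++ l) :=
      (rins_perm v t t.length le_rfl).append_right l
    refine h1.trans ?_
    simpa using (List.perm_middle (l₁ := t) (a := v) (l₂ := l)).symm

theorem insort_sorted (l t : List Int) (ht : t.Pairwise (· ≤ ·)) :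
    (List.foldl insStep t l).Pairwise (· ≤ ·) := by
  induction l generalizing t with
  | nil => simpa
  | cons v l ih =>
    simp only [List.foldl_cons]
    exact ih _ (rins_sorted v t t.length le_rfl ht (by simp))

-- ===== A's index loop, generalised over the finished prefix p and the cursor k into sv =====
theorem a_fold_eq_fillOdds (sv : List Int) (xs : List Int) :
    ∀ (p : List Int) (k : Nat),
      ((PySem.List.pyRange (p.length : Int) ((p.length : Int) + (xs.length : Int)) 1).foldl
        (fun (st : List Int × Int) index =>
          if PySem.Int.mod (PySem.List.pyGetD st.1 index 0) 2 == 1 then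
            (PySem.List.pySetD st.1 index (PySem.List.pyGetD sv st.2 0), st.2 + 1)
          else st)
        (p ++ xs, (k : Int))).1 = p ++ fillOdds xs (sv.drop k) := by
  induction xs with
  | nil =>
    intro p k
    rw [PySem.List.pyRange_one_eq_nil (by simp)]
    simp [fillOdds]
  | cons x r ih =>
    intro p k
    rw [PySem.List.pyRange_one_cons (by push_cast [List.length_cons]; omega), List.foldl_cons]
    have hget : PySem.List.pyGetD (p ++ x :: r) (↑p.length) 0 = x := by
      simp [PySem.List.pyGetD_natCast, List.getD_eq_getElem?_getD]
    by_cases hx : (PySem.Int.mod x 2 == 1) = true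
    · simp only [hget, hx, if_pos]
      have hset : PySem.List.pySetD (p ++ x :: r) (↑p.length) (PySem.List.pyGetD sv (k : Int) 0)
          = (p ++ [sv.getD k 0]) ++ r := by
        simp [PySem.List.pySetD_natCast, PySem.List.pyGetD_natCast]
      rw [hset]
      have := ih (p ++ [sv.getD k 0]) (k + 1)
      rw [show (((p ++ [sv.getD k 0]).length : Int)) = (p.length : Int) + 1 by simp] at this
      rw [show ((p.length : Int) + 1 + (r.length : Int)) = (p.length : Int) + ((x :: r).length : Int) by
        simp; omega] at this
      rw [show (((k : Int)) + 1) = (((k + 1 : Nat) : Int)) by push_cast; omega]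
      rw [this]
      simp only [fillOdds, hx, if_pos, List.append_assoc, List.singleton_append, List.tail_drop]
      congr 2
      simp [List.head?_drop, List.getD_eq_getElem?_getD]
    · simp only [hget, hx, Bool.false_eq_true, if_false]
      rw [show p ++ x :: r = (p ++ [x]) ++ r by simp]
      have := ih (p ++ [x]) k
      rw [show (((p ++ [x]).length : Int)) = (p.length : Int) + 1 by simp] at this
      rw [show ((p.length : Int) + 1 + (r.length : Int)) = (p.length : Int) + ((x :: r).length : Int) by
        simp; omega] at this
      rw [this]
      simp only [fillOdds, hx, Bool.false_eq_true, if_false, List.append_assoc, List.singleton_append]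

-- ===== B's shifting loop simulated on the value list at the odd positions =====
theorem take_getD_lt (s : List Int) (j : Nat) (_hjs : j < s.length) (d : Int) :
    (s.take (j + 1)).getD j d = s.getD j d := by
  simp [List.getD_eq_getElem?_getD]

theorem set_mid (s : List Int) (j : Nat) (hjs : j + 1 ≤ s.length) (X w : Int) :
    (s.take (j + 1) ++ X :: s.drop (j + 1)).set (j + 1) w
      = s.take (j + 1) ++ w :: s.drop (j + 1) := by
  have hlen : (s.take (j + 1)).length = j + 1 := by simp [List.length_take]; omega
  rw [List.set_append_right _ _ (by rw [hlen]), hlen, Nat.sub_self, List.set_cons_zero]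

theorem take_mid (s : List Int) (j : Nat) (hjs : j < s.length) :
    s.take (j + 1) ++ (s.getD j 0) :: s.drop (j + 1)
      = s.take j ++ (s.getD j 0) :: s.drop j := by
  have hgd : s.getD j 0 = s[j] := by
    simp [List.getD_eq_getElem?_getD, List.getElem?_eq_getElem hjs]
  rw [hgd, List.take_add_one, List.getElem?_eq_getElem hjs]
  simp only [Option.toList_some, List.append_assoc, List.singleton_append]
  rw [← List.drop_eq_getElem_cons hjs]

theorem shift_sim (p' suf : List Int) (v : Int) (s : List Int)
    (hc : s.length + 1 = p'.countP (fun x => PySem.Int.mod x 2 == 1)) :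
    ∀ (j : Nat), j ≤ s.length → ∀ (X : Int),
      PySem.List.pySetD
         (bShift ((oddIdx p' 0).map (fun n : Nat => (n : Int))) v j
           (fillOdds p' (s.take j ++ X :: s.drop j) ++ suf)).1
         (PySem.List.pyGetD ((oddIdx p' 0).map (fun n : Nat => (n : Int)))
           (((bShift ((oddIdx p' 0).map (fun n : Nat => (n : Int))) v j
               (fillOdds p' (s.take j ++ X :: s.drop j) ++ suf)).2 : Nat) : Int) 0) v
        = fillOdds p' (rins v s j) ++ suf := by
  intro j
  induction j with
  | zero =>
    intro _ X
    simp only [bShift, List.take_zero, List.drop_zero, List.nil_append]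
    rw [PySem.List.pyGetD_natCast, getD_map_cast]
    have hk : 0 < p'.countP (fun x => PySem.Int.mod x 2 == 1) := by omega
    rw [PySem.List.pySetD_natCast,
      List.set_append_left _ _ (by rw [length_fillOdds]; exact oddIdx_lt p' 0 hk),
      fill_set p' (X :: s) 0 v (by simpa using hc) hk]
    simp [rins]
  | succ j ih =>
    intro hj X
    have hjs : j < s.length := hj
    have hjc : j < p'.countP (fun x => PySem.Int.mod x 2 == 1) := by omega
    have hjc1 : j + 1 < p'.countP (fun x => PySem.Int.mod x 2 == 1) := by omega
    have hu : (s.take (j + 1) ++ X :: s.drop (j + 1)).length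
        = p'.countP (fun x => PySem.Int.mod x 2 == 1) := by
      simp only [List.length_append, List.length_cons, List.length_take, List.length_drop]
      omega
    have hguard : PySem.List.pyGetD (fillOdds p' (s.take (j + 1) ++ X :: s.drop (j + 1)) ++ suf)
        (PySem.List.pyGetD ((oddIdx p' 0).map (fun n : Nat => (n : Int))) ((j : Nat) : Int) 0) 0
        = s.getD j 0 := by
      rw [PySem.List.pyGetD_natCast, getD_map_cast, PySem.List.pyGetD_natCast,
        List.getD_append _ _ _ _ (by rw [length_fillOdds]; exact oddIdx_lt p' j hjc),
        fill_get p' _ j hu hjc,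
        List.getD_append _ _ _ _ (by simp [List.length_take]; omega)]
      exact take_getD_lt s j hjs 0
    simp only [bShift]
    rw [hguard]
    split_ifs with hg
    · have harr : PySem.List.pySetD (fillOdds p' (s.take (j + 1) ++ X :: s.drop (j + 1)) ++ suf)
          (PySem.List.pyGetD ((oddIdx p' 0).map (fun n : Nat => (n : Int))) (((j + 1 : Nat)) : Int) 0)
          (s.getD j 0)
          = fillOdds p' (s.take j ++ (s.getD j 0) :: s.drop j) ++ suf := by
        rw [PySem.List.pyGetD_natCast, getD_map_cast, PySem.List.pySetD_natCast,
          List.set_append_left _ _ (by rw [length_fillOdds]; exact oddIdx_lt p' (j + 1) hjc1),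
          fill_set p' _ (j + 1) _ hu hjc1, set_mid s j hj, take_mid s j hjs]
      rw [harr, show rins v s (j + 1) = rins v s j by
        simp only [rins]; rw [if_pos hg]]
      exact ih (by omega) (s.getD j 0)
    · rw [PySem.List.pyGetD_natCast, getD_map_cast, PySem.List.pySetD_natCast,
        List.set_append_left _ _ (by rw [length_fillOdds]; exact oddIdx_lt p' (j + 1) hjc1),
        fill_set p' _ (j + 1) v hu hjc1, set_mid s j hj,
        show rins v s (j + 1) = s.take (j + 1) ++ v :: s.drop (j + 1) by
          simp only [rins]; rw [if_neg hg]]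

-- ===== B's outer loop =====
theorem b_fold_eq (xs2 : List Int) :
    ∀ (p t : List Int), t.length = p.countP (fun x => PySem.Int.mod x 2 == 1) →
      ((PySem.List.pyRange (p.length : Int) ((p.length : Int) + (xs2.length : Int)) 1).foldl
        (fun (st : List Int × List Int) i =>
          if PySem.Int.mod (PySem.List.pyGetD st.1 i 0) 2 == 1 then
            (PySem.List.pySetD
                (bShift (st.2 ++ [i]) (PySem.List.pyGetD st.1 i 0) ((st.2 ++ [i]).length - 1) st.1).1
                (PySem.List.pyGetD (st.2 ++ [i])
                  (((bShift (st.2 ++ [i]) (PySem.List.pyGetD st.1 i 0) ((st.2 ++ [i]).length - 1) st.1).2 : Nat) : Int) 0)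
                (PySem.List.pyGetD st.1 i 0),
              st.2 ++ [i])
          else st)
        (fillOdds p t ++ xs2, (oddIdx p 0).map (fun n : Nat => (n : Int)))).1
      = fillOdds (p ++ xs2)
          (List.foldl insStep t (xs2.filter (fun x => PySem.Int.mod x 2 == 1))) := by
  induction xs2 with
  | nil =>
    intro p t ht
    rw [PySem.List.pyRange_one_eq_nil (by simp)]
    simp
  | cons x rest ih =>
    intro p t ht
    rw [PySem.List.pyRange_one_cons (by push_cast [List.length_cons]; omega), List.foldl_cons]
    have hv : PySem.List.pyGetD (fillOdds p t ++ x :: rest) ((p.length : Nat) : Int) 0 = x := by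
      rw [PySem.List.pyGetD_natCast,
        List.getD_append_right _ _ _ _ (le_of_eq (length_fillOdds p t)),
        length_fillOdds, Nat.sub_self]
      rfl
    simp only [hv]
    by_cases hx : (PySem.Int.mod x 2 == 1) = true
    · rw [if_pos hx]
      have hpos : ((oddIdx p 0).map (fun n : Nat => (n : Int))) ++ [((p.length : Nat) : Int)]
          = (oddIdx (p ++ [x]) 0).map (fun n : Nat => (n : Int)) := by
        have hsing : oddIdx [x] (0 + p.length) = [0 + p.length] := by
          simp only [oddIdx]; rw [if_pos hx]
        rw [oddIdx_append, hsing]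
        simp
      rw [hpos]
      have hlen : ((oddIdx (p ++ [x]) 0).map (fun n : Nat => (n : Int))).length - 1 = t.length := by
        rw [List.length_map, length_oddIdx, List.countP_append]
        simp only [List.countP_cons, List.countP_nil, hx, if_pos]
        omega
      rw [hlen]
      have harr : fillOdds p t ++ x :: rest
          = fillOdds (p ++ [x]) (t.take t.length ++ x :: t.drop t.length) ++ rest := by
        rw [List.take_length, List.drop_length, fillOdds_append,
          fillOdds_take p t [x] (le_of_eq ht.symm), ← ht, List.drop_left]
        simp [fillOdds]
      rw [harr]
      have hc' : t.length + 1 = (p ++ [x]).countP (fun y => PySem.Int.mod y 2 == 1) := by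
        rw [List.countP_append]
        simp only [List.countP_cons, List.countP_nil, hx, if_pos]
        omega
      rw [shift_sim (p ++ [x]) rest x t hc' t.length le_rfl x]
      have ht' : (rins x t t.length).length = (p ++ [x]).countP (fun y => PySem.Int.mod y 2 == 1) := by
        rw [length_rins x t t.length le_rfl]
        exact hc'
      have hrec := ih (p ++ [x]) (rins x t t.length) ht'
      rw [show (((p ++ [x]).length : Nat) : Int) = ((p.length : Nat) : Int) + 1 by simp] at hrec
      rw [show (((p.length : Nat) : Int) + 1 + ((rest.length : Nat) : Int))
            = ((p.length : Nat) : Int) + (((x :: rest).length : Nat) : Int) by simp; omega] at hrec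
      rw [hrec, List.filter_cons, if_pos hx, List.foldl_cons]
      simp only [insStep, List.append_assoc, List.singleton_append]
    · rw [if_neg hx]
      have harr : fillOdds p t ++ x :: rest = fillOdds (p ++ [x]) t ++ rest := by
        rw [fillOdds_append, ← ht, List.drop_length]
        simp only [fillOdds]
        rw [if_neg hx]
        simp
      have hpos2 : (oddIdx p 0) = oddIdx (p ++ [x]) 0 := by
        have hsing : oddIdx [x] (0 + p.length) = [] := by
          simp only [oddIdx]; rw [if_neg hx]
        rw [oddIdx_append, hsing, List.append_nil]
      rw [harr, hpos2]
      have ht' : t.length = (p ++ [x]).countP (fun y => PySem.Int.mod y 2 == 1) := by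
        have hc0 : List.countP (fun y => PySem.Int.mod y 2 == 1) [x] = 0 := by
          simp only [List.countP_cons, List.countP_nil]; rw [if_neg hx]
        rw [List.countP_append, hc0, ht]
        omega
      have hrec := ih (p ++ [x]) t ht'
      rw [show (((p ++ [x]).length : Nat) : Int) = ((p.length : Nat) : Int) + 1 by simp] at hrec
      rw [show (((p.length : Nat) : Int) + 1 + ((rest.length : Nat) : Int))
            = ((p.length : Nat) : Int) + (((x :: rest).length : Nat) : Int) by simp; omega] at hrec
      rw [hrec, List.filter_cons, if_neg hx]
      simp only [List.append_assoc, List.singleton_append]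


-- ===== VERDICT (by name: the statement is the Claim_ definition above) =====
theorem sort_the_odd_spec : Claim_equal_sort_the_odd := by
  intro xs _
  unfold Spec_sort_the_odd
  simp only [sort_the_odd, sort_the_odd_alt, PySem.List.len_eq]
  -- A's side
  have ha := a_fold_eq_fillOdds
    (PySem.List.sorted (xs.filter (fun item => PySem.Int.mod item 2 == 1)) (fun x => x) false)
    xs [] 0
  simp only [List.length_nil, Nat.cast_zero, List.nil_append, zero_add, List.drop_zero] at ha
  rw [ha]
  -- B's side
  have hb := b_fold_eq xs [] [] (by simp)
  simp only [show fillOdds [] [] = [] from rfl, show oddIdx [] 0 = [] from rfl, List.map_nil,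
    List.nil_append, List.length_nil, Nat.cast_zero, zero_add] at hb
  rw [hb]
  -- the two sorted value lists coincide
  congr 1
  exact PySem.List.sorted_id_eq_of_perm_of_pairwise _ _
    (by simpa using insort_perm (xs.filter (fun x => PySem.Int.mod x 2 == 1)) [])
    (insort_sorted _ [] (by simp))
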